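-- pv_equiv track=rewrite | github.com/RalfCortes/cluster_based_anomaly | evaluator.py | find_anomaly_ranges
-- ===== SOURCE A (Python) =====
-- intervals = list[int]
--
-- def find_anomaly_ranges(labels: list[int])-> list[intervals]:
--     ranges = []
--     start = None
--     for i, label in enumerate(labels):
--         if label == 0 and start is not None:
--             ranges.append([start, i - 1])
--             start = None
--         elif label == 1 and start is None:
--             start = i
--     if start is not None:
--         ranges.append([start, len(labels) - 1])
--     return ranges
-- ===== SOURCE B (Python) =====
-- def find_anomaly_ranges(labels):
--     # Pass 1: boolean membership array; non-0/1 labels carry the previous state.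
--     state = []
--     carry = False
--     for label in labels:
--         if label == 0:
--             carry = False
--         elif label == 1:
--             carry = True
--         state.append(carry)
--     # Pass 2: collect maximal runs of True as inclusive [start, end] ranges.
--     ranges = []
--     run_start = None
--     for i, s in enumerate(state):
--         if s:
--             if run_start is None:
--                 run_start = i
--         else:
--             if run_start is not None:
--                 ranges.append([run_start, i - 1])
--                 run_start = None
--     if run_start is not None:
--         ranges.append([run_start, len(state) - 1])
--     return ranges
-- ===== Notes on version B (the rewrite author's own statement) =====
-- stated objective: alternative
-- what changed: Replaces A's single label-driven state machine with two passes: first a boolean in-anomaly array computed by carrying the previous state through non-0/1 labels, then a run-extraction pass over that boolean array.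
import Mathlib
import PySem

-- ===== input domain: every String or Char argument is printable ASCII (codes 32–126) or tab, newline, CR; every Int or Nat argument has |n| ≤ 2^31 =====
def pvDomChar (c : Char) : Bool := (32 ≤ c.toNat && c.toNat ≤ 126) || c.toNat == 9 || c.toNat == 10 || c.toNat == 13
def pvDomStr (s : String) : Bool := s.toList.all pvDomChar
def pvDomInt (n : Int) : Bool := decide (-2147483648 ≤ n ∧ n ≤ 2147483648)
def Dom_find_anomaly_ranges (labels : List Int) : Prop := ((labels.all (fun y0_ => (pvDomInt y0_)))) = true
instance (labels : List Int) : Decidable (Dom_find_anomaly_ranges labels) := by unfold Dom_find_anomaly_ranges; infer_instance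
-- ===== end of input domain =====

-- B replaces A's label-driven state machine with a boolean in-anomaly array (carrying the
-- previous state through non-0/1 labels) followed by a run-extraction pass; alternative decomposition, same cost.


-- ===== PORT A =====
-- the for loop: index i, open-range start, accumulated ranges
def faLoop (i : Int) (start : Option Int) (ranges : List (List Int)) : List Int → List (List Int) × Option Int
  | [] => (ranges, start)
  | l :: ls =>
    match start with
    | some s =>
      if l = 0 then faLoop (i + 1) none (ranges ++ [[s, i - 1]]) ls
      else faLoop (i + 1) (some s) ranges ls
    | none =>
      if l = 1 then faLoop (i + 1) (some i) ranges ls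
      else faLoop (i + 1) none ranges ls

def find_anomaly_ranges (labels : List Int) : List (List Int) :=
  let (ranges, start) := faLoop 0 none [] labels
  match start with
  | some s => ranges ++ [[s, (labels.length : Int) - 1]]
  | none => ranges

-- ===== PORT B =====
-- pass 1: boolean in-anomaly array; non-0/1 labels carry the previous state
def fbStates (carry : Bool) : List Int → List Bool
  | [] => []
  | l :: ls =>
    let c := if l = 0 then false else if l = 1 then true else carry
    c :: fbStates c ls

-- pass 2: collect maximal runs of True
def fbRuns (i : Int) (runStart : Option Int) (ranges : List (List Int)) : List Bool → List (List Int) × Option Int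
  | [] => (ranges, runStart)
  | b :: bs =>
    if b then
      match runStart with
      | none => fbRuns (i + 1) (some i) ranges bs
      | some s => fbRuns (i + 1) (some s) ranges bs
    else
      match runStart with
      | some s => fbRuns (i + 1) none (ranges ++ [[s, i - 1]]) bs
      | none => fbRuns (i + 1) none ranges bs

def find_anomaly_ranges_alt (labels : List Int) : List (List Int) :=
  let state := fbStates false labels
  let (ranges, runStart) := fbRuns 0 none [] state
  match runStart with
  | some s => ranges ++ [[s, (state.length : Int) - 1]]
  | none => ranges

-- ===== PRECONDITION & SPEC =====
def Spec_find_anomaly_ranges (labels : List Int) (out : List (List Int)) : Prop := out = find_anomaly_ranges_alt labels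
instance (labels : List Int) (out : List (List Int)) : Decidable (Spec_find_anomaly_ranges labels out) := by unfold Spec_find_anomaly_ranges; infer_instance

-- ===== CLAIM (what is proved, stated in full; the proofs are below) =====
def Claim_equal_find_anomaly_ranges : Prop := ∀ (labels : List Int), Dom_find_anomaly_ranges labels → Spec_find_anomaly_ranges labels (find_anomaly_ranges labels)

-- ===== LEMMAS AND PROOFS =====
lemma fbStates_length (c : Bool) (ls : List Int) : (fbStates c ls).length = ls.length := by
  induction ls generalizing c with
  | nil => rfl
  | cons l ls ih => simp [fbStates, ih]

-- core invariant: A's loop and (states ∘ runs) agree when the carry equals start.isSome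
lemma loop_eq (ls : List Int) : ∀ (i : Int) (start : Option Int) (ranges : List (List Int)),
    faLoop i start ranges ls = fbRuns i start ranges (fbStates start.isSome ls) := by
  induction ls with
  | nil => intro i start ranges; rfl
  | cons l ls ih =>
    intro i start ranges
    cases start with
    | some s =>
      by_cases h0 : l = 0
      · simp [faLoop, fbStates, fbRuns, h0, ih]
      · by_cases h1 : l = 1 <;> simp [faLoop, fbStates, fbRuns, h0, h1, ih]
    | none =>
      by_cases h0 : l = 0
      · simp [faLoop, fbStates, fbRuns, h0, ih]
      · by_cases h1 : l = 1 <;> simp [faLoop, fbStates, fbRuns, h0, h1, ih]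

-- ===== VERDICT (by name: the statement is the Claim_ definition above) =====
theorem find_anomaly_ranges_spec : Claim_equal_find_anomaly_ranges := by
  intro labels _
  unfold Spec_find_anomaly_ranges find_anomaly_ranges find_anomaly_ranges_alt
  have h := loop_eq labels 0 none []
  simp only [Option.isSome_none] at h
  simp only [h, fbStates_length]
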